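-- pv_equiv track=rewrite | github.com/Creidhne86/Advent_2023 | 2023/d1p2.py | written_number_indices
-- ===== SOURCE A (Python) =====
-- def written_number_indices(text):
--     min_index = len(text)
--     left_num = "none"
--     max_index = -1
--     right_num = "none"
--     written_numbers = ["one", "two", "three", "four", "five", "six", "seven", "eight", "nine"]
--
--     for number in written_numbers:
--         start_index = text.find(number)
--         if start_index != -1:
--
--             if start_index < min_index:
--                 min_index = start_index
--                 left_num = number
--
--             # Finding the start index of the last occurrence
--             last_occurrence_start_index = text.rfind(number)
--             if last_occurrence_start_index > max_index:
--                 max_index = last_occurrence_start_index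
--                 right_num = number
--
--     return [[left_num, min_index], [right_num, max_index]]
-- ===== SOURCE B (Python) =====
-- def written_number_indices(text):
--     words = ["one", "two", "three", "four", "five", "six", "seven", "eight", "nine"]
--     n = len(text)
--     matches = [[w, i] for i in range(n) for w in words if text[i:i + len(w)] == w]
--     left = matches[0] if matches else ["none", n]
--     right = matches[-1] if matches else ["none", -1]
--     return [left, right]
-- ===== Notes on version B (the rewrite author's own statement) =====
-- stated objective: alternative
-- what changed: A runs find/rfind per number word and tracks min/max indices with sentinels; B makes one positional scan collecting all (word, index) matches in order and takes the first and last match (same sentinels when there is none).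
import Mathlib
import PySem

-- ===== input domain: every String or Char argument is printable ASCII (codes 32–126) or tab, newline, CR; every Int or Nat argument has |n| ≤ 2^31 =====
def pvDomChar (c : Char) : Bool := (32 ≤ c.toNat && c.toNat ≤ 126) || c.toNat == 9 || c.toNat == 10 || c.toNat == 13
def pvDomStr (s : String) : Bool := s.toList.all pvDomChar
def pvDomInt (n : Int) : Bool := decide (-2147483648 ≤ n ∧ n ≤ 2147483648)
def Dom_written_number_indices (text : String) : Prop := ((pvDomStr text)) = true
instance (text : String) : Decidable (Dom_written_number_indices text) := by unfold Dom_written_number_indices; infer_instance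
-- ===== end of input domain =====

-- B replaces A's per-word find/rfind + min/max tracking by one positional scan that
-- collects all (word, index) matches in order and takes the first and last (objective: alternative).

-- ===== PORT A =====
-- A's loop body: find/rfind of the current word, with min/max updates (state ((min_index, left_num), (max_index, right_num)))
def wniStepA (text : String) (st : (Int × String) × (Int × String)) (number : String) :
    (Int × String) × (Int × String) :=
  let startIndex := PySem.Str.find text number
  if startIndex ≠ -1 then
    let mn := if startIndex < st.1.1 then (startIndex, number) else st.1
    let lastOccurrenceStartIndex := PySem.Str.rfind text number
    let mx := if lastOccurrenceStartIndex > st.2.1 then (lastOccurrenceStartIndex, number) else st.2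
    (mn, mx)
  else st

def written_number_indices (text : String) : List (String × Int) :=
  let writtenNumbers : List String := ["one", "two", "three", "four", "five", "six", "seven", "eight", "nine"]
  let st := writtenNumbers.foldl (wniStepA text) ((PySem.Str.len text, "none"), ((-1 : Int), "none"))
  [(st.1.2, st.1.1), (st.2.2, st.2.1)]

-- ===== PORT B =====
def written_number_indices_alt (text : String) : List (String × Int) :=
  let words : List String := ["one", "two", "three", "four", "five", "six", "seven", "eight", "nine"]
  let n := PySem.Str.len text
  let ms := (PySem.List.pyRange 0 n).flatMap (fun i =>
    (words.filter (fun w => PySem.Str.slice text (some i) (some (i + PySem.Str.len w)) == w)).map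
      (fun w => (w, i)))
  let left := ms.headD ("none", n)
  let right := ms.getLastD ("none", (-1 : Int))
  [left, right]

-- ===== PRECONDITION & SPEC =====
def Spec_written_number_indices (text : String) (out : List (String × Int)) : Prop := out = written_number_indices_alt text
instance (text : String) (out : List (String × Int)) : Decidable (Spec_written_number_indices text out) := by unfold Spec_written_number_indices; infer_instance

-- ===== CLAIM (what is proved, stated in full; the proofs are below) =====
def Claim_equal_written_number_indices : Prop := ∀ (text : String), Dom_written_number_indices text → Spec_written_number_indices text (written_number_indices text)

-- ===== LEMMAS AND PROOFS =====

def words9 : List String := ["one", "two", "three", "four", "five", "six", "seven", "eight", "nine"]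

-- the words that match at position i, in words9 order
def mAt (s : List Char) (i : Nat) : List String :=
  words9.filter (fun w => w.toList.isPrefixOf (List.drop i s))

-- does any word match at position i?
def qAt (s : List Char) (i : Nat) : Bool :=
  words9.any (fun w => w.toList.isPrefixOf (List.drop i s))

-- the (word, index) matches of the whole string, in position order (B's `ms` list)
def msList (s : List Char) : List (String × Int) :=
  (List.range s.length).flatMap (fun i => (mAt s i).map (fun w => (w, (i : Int))))

def gOf (s : List Char) (i : Nat) : Option (String × Int) :=
  (mAt s i).head?.map (fun w => (w, (i : Int)))

-- ---- basic facts about the nine words ----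

theorem words9_prefix_eq : ∀ w ∈ words9, ∀ w' ∈ words9, w.toList <+: w'.toList → w = w' := by
  decide

theorem words9_ne_nil : ∀ w ∈ words9, w.toList ≠ [] := by decide

theorem words9_nodup : words9.Nodup := by decide

-- at most one word matches at a given place
theorem uniq_match {t : List Char} {w w' : String} (hw : w ∈ words9) (hw' : w' ∈ words9)
    (h1 : w.toList <+: t) (h2 : w'.toList <+: t) : w = w' := by
  rcases List.prefix_or_prefix_of_prefix h1 h2 with h | h
  · exact words9_prefix_eq w hw w' hw' h
  · exact (words9_prefix_eq w' hw' w hw h).symm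

theorem mAt_cases (s : List Char) (i : Nat) : mAt s i = [] ∨ ∃ w, mAt s i = [w] := by
  have hnd : (mAt s i).Nodup := List.Nodup.filter _ words9_nodup
  have heq : ∀ a ∈ mAt s i, ∀ b ∈ mAt s i, a = b := by
    intro a ha b hb
    rw [mAt, List.mem_filter] at ha hb
    exact uniq_match ha.1 hb.1 (List.isPrefixOf_iff_prefix.mp ha.2) (List.isPrefixOf_iff_prefix.mp hb.2)
  match h : mAt s i with
  | [] => exact Or.inl rfl
  | [w] => exact Or.inr ⟨w, rfl⟩
  | a :: b :: t =>
    rw [h] at hnd heq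
    have : a = b := heq a (by simp) b (by simp)
    simp [this] at hnd

-- any word match forces the position to be inside the string
theorem match_lt {s : List Char} {w : String} {i : Nat} (hw : w ∈ words9)
    (h : w.toList <+: List.drop i s) : i < s.length := by
  have hne : w.toList ≠ [] := words9_ne_nil w hw
  have hlen := h.length_le
  rw [List.length_drop] at hlen
  have : 0 < w.toList.length := List.length_pos_iff.mpr hne
  omega

theorem q_lt {s : List Char} {i : Nat} (h : qAt s i = true) : i < s.length := by
  rw [qAt, List.any_eq_true] at h
  obtain ⟨w, hw, hpre⟩ := h
  exact match_lt hw (List.isPrefixOf_iff_prefix.mp hpre)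

-- ---- B-side normalisation ----

theorem beq_toList (a w : String) : (a == w) = (a.toList == w.toList) := by
  rcases Bool.eq_false_or_eq_true (a == w) with h | h <;>
    rcases Bool.eq_false_or_eq_true (a.toList == w.toList) with h2 | h2 <;>
      simp_all [beq_iff_eq, String.toList_inj]

theorem slice_pred (text w : String) (i : Nat) :
    (PySem.Str.slice text (some (i : Int)) (some ((i : Int) + PySem.Str.len w)) == w)
      = w.toList.isPrefixOf (List.drop i text.toList) := by
  have h1 : (PySem.Str.slice text (some (i : Int)) (some ((i : Int) + PySem.Str.len w))).toList
      = (List.drop i text.toList).take w.toList.length := by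
    rw [PySem.Str.toList_slice, PySem.Str.len_eq, PySem.Chars.slice_eq_listSlice,
      PySem.List.slice_natCast_add]
  rw [beq_toList, h1, Bool.eq_iff_iff, beq_iff_eq, List.isPrefixOf_iff_prefix,
    List.prefix_iff_eq_take]
  exact eq_comm

theorem alt_eq (text : String) :
    written_number_indices_alt text =
      [(msList text.toList).headD ("none", (text.toList.length : Int)),
       (msList text.toList).getLastD ("none", (-1 : Int))] := by
  show _ = _
  dsimp only [written_number_indices_alt]
  rw [PySem.Str.len_eq, PySem.List.pyRange_zero_natCast, List.flatMap_map]
  have : (fun (k : Nat) =>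
      ((["one", "two", "three", "four", "five", "six", "seven", "eight", "nine"] : List String).filter
        (fun w => PySem.Str.slice text (some (k : Int)) (some ((k : Int) + PySem.Str.len w)) == w)).map
          (fun w => (w, (k : Int))))
      = (fun i => (mAt text.toList i).map (fun w => (w, (i : Int)))) := by
    funext k
    simp only [mAt, words9]
    congr 1
    apply List.filter_congr
    intro w _
    exact slice_pred text w k
  rw [this, msList]

-- generic: flatMap whose pieces are option-sized is a filterMap
theorem flatMap_eq_filterMap {α β : Type} (l : List α) (f : α → List β) (g : α → Option β)
    (h : ∀ a ∈ l, f a = (g a).toList) : l.flatMap f = l.filterMap g := by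
  induction l with
  | nil => rfl
  | cons a t ih =>
    rw [List.flatMap_cons, List.filterMap_cons, h a (by simp), ih (fun x hx => h x (by simp [hx]))]
    cases g a <;> simp

theorem head?_filterMap {α β : Type} (l : List α) (g : α → Option β) :
    (l.filterMap g).head? = (l.find? (fun a => (g a).isSome)).bind g := by
  induction l with
  | nil => rfl
  | cons a t ih =>
    rw [List.filterMap_cons, List.find?_cons]
    cases h : g a <;> simp [h, ih]

theorem getLast?_filterMap {α β : Type} (l : List α) (g : α → Option β) :
    (l.filterMap g).getLast? = (l.reverse.find? (fun a => (g a).isSome)).bind g := by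
  rw [List.getLast?_eq_head?_reverse, ← List.filterMap_reverse, head?_filterMap]

theorem find?_range_eq_some {n i0 : Nat} {p : Nat → Bool} (h1 : i0 < n) (h2 : p i0 = true)
    (h3 : ∀ j < i0, p j = false) : (List.range n).find? p = some i0 := by
  induction n with
  | zero => omega
  | succ n ih =>
    rw [List.range_succ, List.find?_append]
    rcases Nat.lt_or_ge i0 n with h | h
    · rw [ih h]; rfl
    · have hi : i0 = n := by omega
      have : (List.range n).find? p = none := by
        rw [List.find?_eq_none]
        intro j hj
        simp only [List.mem_range] at hj
        simp [h3 j (by omega)]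
      rw [this, hi]
      simp [← hi, h2]

theorem find?_range_rev_eq_some {n i1 : Nat} {p : Nat → Bool} (h1 : i1 < n) (h2 : p i1 = true)
    (h3 : ∀ j, i1 < j → p j = false) : (List.range n).reverse.find? p = some i1 := by
  induction n with
  | zero => omega
  | succ n ih =>
    rw [List.range_succ, List.reverse_append]
    rcases Nat.lt_or_ge i1 n with h | h
    · have hn : p n = false := h3 n (by omega)
      simp only [List.reverse_cons, List.reverse_nil, List.nil_append, List.singleton_append,
        List.find?_cons, hn]
      exact ih h
    · have hi : i1 = n := by omega
      subst hi
      simp [h2]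

theorem msList_eq_filterMap (s : List Char) :
    msList s = (List.range s.length).filterMap (gOf s) := by
  apply flatMap_eq_filterMap
  intro i _
  rcases mAt_cases s i with h | ⟨w, h⟩ <;> simp [gOf, h]

theorem isSome_gOf (s : List Char) (i : Nat) : (gOf s i).isSome = qAt s i := by
  rw [Bool.eq_iff_iff]
  rcases mAt_cases s i with h | ⟨w, h⟩
  · simp [gOf, h]
    have hnone : ∀ w ∈ words9, ¬ w.toList.isPrefixOf (List.drop i s) = true := by
      intro w hw hpre
      have : w ∈ mAt s i := by rw [mAt, List.mem_filter]; exact ⟨hw, hpre⟩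
      simp [h] at this
    simp [qAt]
    intro w hw
    exact fun hpre => (hnone w hw (List.isPrefixOf_iff_prefix.mpr hpre))
  · have hw : w ∈ mAt s i := by simp [h]
    rw [mAt, List.mem_filter] at hw
    simp [gOf, h, qAt, List.any_eq_true]
    exact ⟨w, hw.1, List.isPrefixOf_iff_prefix.mp hw.2⟩

-- ---- A-side: find / rfind characterisations ----

theorem find_eq_of {s sub : List Char} {i : Nat} (h1 : sub <+: List.drop i s)
    (h2 : ∀ j < i, ¬ sub <+: List.drop j s) : PySem.Chars.find s sub = (i : Int) := by
  have hin : PySem.Chars.isIn sub s = true :=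
    (PySem.Chars.exists_prefix_drop_iff_isIn sub s).mp ⟨i, h1⟩
  have hnn : 0 ≤ PySem.Chars.find s sub := by
    rw [PySem.Chars.find_nonneg_iff]
    exact (PySem.Chars.isIn_iff_infix sub s).mp hin
  obtain ⟨hpre, hmin⟩ := PySem.Chars.find_spec hnn
  have : (PySem.Chars.find s sub).toNat = i := by
    rcases Nat.lt_trichotomy (PySem.Chars.find s sub).toNat i with h | h | h
    · exact absurd hpre (h2 _ h)
    · exact h
    · exact absurd h1 (hmin i h)
  omega

theorem rfind_go_eq_of {s sub : List Char} {i : Nat} : ∀ {k : Nat}, i ≤ k →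
    sub <+: List.drop i s → (∀ j, i < j → j ≤ k → ¬ sub <+: List.drop j s) →
    PySem.Chars.rfind.go s sub k = (i : Int) := by
  intro k
  induction k with
  | zero =>
    intro hik h1 _
    have : i = 0 := by omega
    subst this
    simp only [PySem.Chars.rfind.go]
    simp [List.isPrefixOf_iff_prefix, List.drop_zero] at h1 ⊢
    simp [h1]
  | succ k ih =>
    intro hik h1 h2
    rcases Nat.lt_or_ge i (k+1) with h | h
    · have hk : ¬ sub <+: List.drop (k+1) s := h2 (k+1) (by omega) (le_refl _)
      simp only [PySem.Chars.rfind.go]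
      rw [if_neg (by simpa [List.isPrefixOf_iff_prefix] using hk)]
      exact ih (by omega) h1 (fun j hj hjk => h2 j hj (by omega))
    · have : i = k+1 := by omega
      subst this
      simp only [PySem.Chars.rfind.go]
      rw [if_pos (by simpa [List.isPrefixOf_iff_prefix] using h1)]

theorem rfind_go_cases (s sub : List Char) : ∀ k : Nat,
    PySem.Chars.rfind.go s sub k = -1 ∨
    ∃ j ≤ k, PySem.Chars.rfind.go s sub k = (j : Int) ∧ sub <+: List.drop j s := by
  intro k
  induction k with
  | zero =>
    by_cases h : sub.isPrefixOf s
    · exact Or.inr ⟨0, le_refl _, by simp [PySem.Chars.rfind.go, h],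
        by simpa [List.isPrefixOf_iff_prefix] using h⟩
    · exact Or.inl (by simp [PySem.Chars.rfind.go, h])
  | succ k ih =>
    by_cases h : sub.isPrefixOf (List.drop (k+1) s)
    · refine Or.inr ⟨k+1, le_refl _, ?_, by simpa [List.isPrefixOf_iff_prefix] using h⟩
      simp only [PySem.Chars.rfind.go]
      rw [if_pos h]
    · have hgo : PySem.Chars.rfind.go s sub (k+1) = PySem.Chars.rfind.go s sub k := by
        simp only [PySem.Chars.rfind.go]
        rw [if_neg h]
      rcases ih with h' | ⟨j, hj, h', hpre⟩
      · exact Or.inl (hgo.trans h')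
      · exact Or.inr ⟨j, by omega, hgo.trans h', hpre⟩

-- ---- A-side: the two selection folds ----

theorem selmin_stay {α : Type} (g k : α → Int) (ws : List α) (p : Int × α)
    (h : ∀ w ∈ ws, g w ≠ -1 → p.1 ≤ k w) :
    ws.foldl (fun p w => if g w ≠ -1 then (if k w < p.1 then (k w, w) else p) else p) p = p := by
  induction ws with
  | nil => rfl
  | cons w t ih =>
    rw [List.foldl_cons]
    have hstep : (if g w ≠ -1 then (if k w < p.1 then (k w, w) else p) else p) = p := by
      by_cases hg : g w = -1
      · simp [hg]
      · have := h w (by simp) hg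
        rw [if_pos hg, if_neg (by omega)]
    rw [hstep]
    exact ih (fun w hw => h w (by simp [hw]))

theorem selmin_reach {α : Type} (g k : α → Int) (ws : List α) (w0 : α)
    (hmem : w0 ∈ ws) (hg : g w0 ≠ -1)
    (hmin : ∀ w ∈ ws, g w ≠ -1 → k w0 ≤ k w ∧ (k w = k w0 → w = w0)) :
    ∀ p : Int × α, k w0 < p.1 →
    ws.foldl (fun p w => if g w ≠ -1 then (if k w < p.1 then (k w, w) else p) else p) p = (k w0, w0) := by
  induction ws with
  | nil => simp at hmem
  | cons w t ih =>
    intro p hp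
    rw [List.foldl_cons]
    by_cases hw : w = w0
    · subst hw
      rw [if_pos hg, if_pos hp]
      exact selmin_stay g k t (k w, w) (fun w' hw' hg' => (hmin w' (by simp [hw']) hg').1)
    · have hmem' : w0 ∈ t := (List.mem_cons.mp hmem).resolve_left (fun he => hw he.symm)
      have hstep : k w0 < (if g w ≠ -1 then (if k w < p.1 then (k w, w) else p) else p).1 := by
        by_cases hgw : g w = -1
        · simpa [hgw] using hp
        · obtain ⟨hle, heq⟩ := hmin w (by simp) hgw
          have : k w0 < k w := by
            rcases lt_or_eq_of_le hle with h | h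
            · exact h
            · exact absurd (heq h.symm) hw
          rw [if_pos hgw]
          by_cases hlt : k w < p.1 <;> simp [hlt] <;> omega
      exact ih hmem' (fun w' hw' => hmin w' (by simp [hw'])) _ hstep

theorem selmax_stay {α : Type} (g k : α → Int) (ws : List α) (p : Int × α)
    (h : ∀ w ∈ ws, g w ≠ -1 → k w ≤ p.1) :
    ws.foldl (fun p w => if g w ≠ -1 then (if k w > p.1 then (k w, w) else p) else p) p = p := by
  induction ws with
  | nil => rfl
  | cons w t ih =>
    rw [List.foldl_cons]
    have hstep : (if g w ≠ -1 then (if k w > p.1 then (k w, w) else p) else p) = p := by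
      by_cases hg : g w = -1
      · simp [hg]
      · have := h w (by simp) hg
        rw [if_pos hg, if_neg (by omega)]
    rw [hstep]
    exact ih (fun w hw => h w (by simp [hw]))

theorem selmax_reach {α : Type} (g k : α → Int) (ws : List α) (w1 : α)
    (hmem : w1 ∈ ws) (hg : g w1 ≠ -1)
    (hmax : ∀ w ∈ ws, g w ≠ -1 → k w ≤ k w1 ∧ (k w = k w1 → w = w1)) :
    ∀ p : Int × α, p.1 < k w1 →
    ws.foldl (fun p w => if g w ≠ -1 then (if k w > p.1 then (k w, w) else p) else p) p = (k w1, w1) := by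
  induction ws with
  | nil => simp at hmem
  | cons w t ih =>
    intro p hp
    rw [List.foldl_cons]
    by_cases hw : w = w1
    · subst hw
      rw [if_pos hg, if_pos (by omega)]
      exact selmax_stay g k t (k w, w) (fun w' hw' hg' => (hmax w' (by simp [hw']) hg').1)
    · have hmem' : w1 ∈ t := (List.mem_cons.mp hmem).resolve_left (fun he => hw he.symm)
      have hstep : (if g w ≠ -1 then (if k w > p.1 then (k w, w) else p) else p).1 < k w1 := by
        by_cases hgw : g w = -1
        · simpa [hgw] using hp
        · obtain ⟨hle, heq⟩ := hmax w (by simp) hgw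
          have : k w < k w1 := by
            rcases lt_or_eq_of_le hle with h | h
            · exact h
            · exact absurd (heq h) hw
          rw [if_pos hgw]
          by_cases hlt : k w > p.1 <;> simp [hlt] <;> omega
      exact ih hmem' (fun w' hw' => hmax w' (by simp [hw'])) _ hstep

-- A's loop body splits into independent min- and max-halves
def fMin (text : String) (p : Int × String) (w : String) : Int × String :=
  if PySem.Str.find text w ≠ -1 then
    (if PySem.Str.find text w < p.1 then (PySem.Str.find text w, w) else p) else p

def fMax (text : String) (p : Int × String) (w : String) : Int × String :=
  if PySem.Str.find text w ≠ -1 then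
    (if PySem.Str.rfind text w > p.1 then (PySem.Str.rfind text w, w) else p) else p

theorem stepA_split (text : String) :
    wniStepA text = fun (st : (Int × String) × (Int × String)) number =>
      (fMin text st.1 number, fMax text st.2 number) := by
  funext st number
  simp only [wniStepA, fMin, fMax]
  by_cases h : PySem.Chars.find text.toList number.toList = -1 <;> simp [h]

-- ===== VERDICT (by name: the statement is the Claim_ definition above) =====
theorem written_number_indices_spec : Claim_equal_written_number_indices := by
  intro text _
  show written_number_indices text = written_number_indices_alt text
  rw [alt_eq]
  dsimp only [written_number_indices]
  rw [show (["one", "two", "three", "four", "five", "six", "seven", "eight", "nine"] : List String)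
      = words9 from rfl,
    stepA_split text, PySem.List.foldl_prod_mk, PySem.Str.len_eq]
  by_cases hEx : ∃ i, qAt text.toList i = true
  · -- some word occurs in the text
    set s := text.toList with hs
    -- first matched position and its word
    set i0 := Nat.find hEx with hi0
    have hq0 : qAt s i0 = true := Nat.find_spec hEx
    have hmin0 : ∀ j < i0, qAt s j = false := fun j hj => by
      simpa using Nat.find_min hEx hj
    have hi0lt : i0 < s.length := q_lt hq0
    have hg0 : (gOf s i0).isSome = true := by rw [isSome_gOf, hq0]
    obtain ⟨⟨w0, j0⟩, hw0⟩ := Option.isSome_iff_exists.mp hg0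
    have hw0h : (mAt s i0).head? = some w0 ∧ j0 = (i0 : Int) := by
      rw [gOf] at hw0
      cases hh : (mAt s i0).head? with
      | none => rw [hh] at hw0; simp at hw0
      | some w => rw [hh] at hw0; simp at hw0; exact ⟨by rw [hw0.1], hw0.2.symm⟩
    have hw0mem : w0 ∈ mAt s i0 := List.mem_of_mem_head? hw0h.1
    have hw0w : w0 ∈ words9 ∧ w0.toList <+: List.drop i0 s := by
      rw [mAt, List.mem_filter] at hw0mem
      exact ⟨hw0mem.1, List.isPrefixOf_iff_prefix.mp hw0mem.2⟩
    -- last matched position and its word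
    set i1 := Nat.findGreatest (fun j => qAt s j = true) s.length with hi1
    obtain ⟨iw, hiw⟩ := hEx
    have hq1 : qAt s i1 = true :=
      Nat.findGreatest_spec (P := fun j => qAt s j = true) (le_of_lt (q_lt hiw)) hiw
    have hmax1 : ∀ j, i1 < j → qAt s j = false := by
      intro j hj
      rcases Nat.le_total j s.length with h | h
      · by_cases hqj : qAt s j = true
        · exact absurd hqj (Nat.findGreatest_is_greatest (P := fun j => qAt s j = true) hj h)
        · simpa using hqj
      · by_cases hqj : qAt s j = true
        · exact absurd (q_lt hqj) (by omega)
        · simpa using hqj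
    have hi1lt : i1 < s.length := q_lt hq1
    have hg1 : (gOf s i1).isSome = true := by rw [isSome_gOf, hq1]
    obtain ⟨⟨w1, j1⟩, hw1⟩ := Option.isSome_iff_exists.mp hg1
    have hw1h : (mAt s i1).head? = some w1 ∧ j1 = (i1 : Int) := by
      rw [gOf] at hw1
      cases hh : (mAt s i1).head? with
      | none => rw [hh] at hw1; simp at hw1
      | some w => rw [hh] at hw1; simp at hw1; exact ⟨by rw [hw1.1], hw1.2.symm⟩
    have hw1mem : w1 ∈ mAt s i1 := List.mem_of_mem_head? hw1h.1
    have hw1w : w1 ∈ words9 ∧ w1.toList <+: List.drop i1 s := by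
      rw [mAt, List.mem_filter] at hw1mem
      exact ⟨hw1mem.1, List.isPrefixOf_iff_prefix.mp hw1mem.2⟩
    -- find / rfind values
    have hfnd0 : PySem.Str.find text w0 = (i0 : Int) := by
      rw [PySem.Str.find_eq, ← hs]
      apply find_eq_of hw0w.2
      intro j hj hpre
      have : qAt s j = true := by
        rw [qAt, List.any_eq_true]
        exact ⟨w0, hw0w.1, List.isPrefixOf_iff_prefix.mpr hpre⟩
      rw [hmin0 j hj] at this
      exact Bool.false_ne_true this
    have hrfd1 : PySem.Str.rfind text w1 = (i1 : Int) := by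
      rw [PySem.Str.rfind_eq, ← hs, PySem.Chars.rfind]
      apply rfind_go_eq_of (le_of_lt hi1lt) hw1w.2
      intro j hj _ hpre
      have : qAt s j = true := by
        rw [qAt, List.any_eq_true]
        exact ⟨w1, hw1w.1, List.isPrefixOf_iff_prefix.mpr hpre⟩
      rw [hmax1 j hj] at this
      exact Bool.false_ne_true this
    have hfnd1ne : PySem.Str.find text w1 ≠ -1 := by
      rw [PySem.Str.find_eq, ← hs, PySem.Chars.find_ne_neg_one_iff]
      exact (PySem.Chars.isIn_iff_infix _ _).mp
        ((PySem.Chars.exists_prefix_drop_iff_isIn _ _).mp ⟨i1, hw1w.2⟩)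
    -- the min-fold hypotheses
    have hminH : ∀ w ∈ words9, PySem.Str.find text w ≠ -1 →
        PySem.Str.find text w0 ≤ PySem.Str.find text w ∧
        (PySem.Str.find text w = PySem.Str.find text w0 → w = w0) := by
      intro w hw hne
      simp only [PySem.Str.find_eq, ← hs] at hne ⊢
      have hnn : 0 ≤ PySem.Chars.find s w.toList := by
        have := PySem.Chars.neg_one_le_find s w.toList
        omega
      obtain ⟨hpre, _⟩ := PySem.Chars.find_spec hnn
      set j := (PySem.Chars.find s w.toList).toNat with hj
      have hqj : qAt s j = true := by
        rw [qAt, List.any_eq_true]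
        exact ⟨w, hw, List.isPrefixOf_iff_prefix.mpr hpre⟩
      have hij : i0 ≤ j := by
        by_contra hlt
        rw [hmin0 j (by omega)] at hqj
        exact Bool.false_ne_true hqj
      have hjval : PySem.Chars.find s w.toList = (j : Int) := by
        rw [hj, Int.toNat_of_nonneg hnn]
      constructor
      · simp only [PySem.Str.find_eq, ← hs] at hfnd0
        rw [hfnd0, hjval]
        exact_mod_cast hij
      · intro heq
        simp only [PySem.Str.find_eq, ← hs] at hfnd0
        rw [hfnd0, hjval] at heq
        have : j = i0 := by exact_mod_cast heq
        rw [this] at hpre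
        exact uniq_match hw hw0w.1 hpre hw0w.2
    -- the max-fold hypotheses
    have hmaxH : ∀ w ∈ words9, PySem.Str.find text w ≠ -1 →
        PySem.Str.rfind text w ≤ PySem.Str.rfind text w1 ∧
        (PySem.Str.rfind text w = PySem.Str.rfind text w1 → w = w1) := by
      intro w hw _
      rw [hrfd1, PySem.Str.rfind_eq, ← hs, PySem.Chars.rfind]
      rcases rfind_go_cases s w.toList s.length with h | ⟨j, _, hval, hpre⟩
      · rw [h]
        constructor
        · omega
        · intro heq; omega
      · rw [hval]
        have hqj : qAt s j = true := by
          rw [qAt, List.any_eq_true]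
          exact ⟨w, hw, List.isPrefixOf_iff_prefix.mpr hpre⟩
        have hij : j ≤ i1 := by
          by_contra hlt
          rw [hmax1 j (by omega)] at hqj
          exact Bool.false_ne_true hqj
        constructor
        · exact_mod_cast hij
        · intro heq
          have : j = i1 := by exact_mod_cast heq
          rw [this] at hpre
          exact uniq_match hw hw1w.1 hpre hw1w.2
    -- evaluate A's two folds
    have hfoldmin :
        words9.foldl (fMin text) (((s.length : Int)), "none") = ((i0 : Int), w0) := by
      have := selmin_reach (fun w => PySem.Str.find text w) (fun w => PySem.Str.find text w)
        words9 w0 hw0w.1 (by show PySem.Str.find text w0 ≠ -1; rw [hfnd0]; omega) hminH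
        (((s.length : Int)), "none")
        (by show PySem.Str.find text w0 < ((s.length : Int)); rw [hfnd0]; exact_mod_cast hi0lt)
      simpa only [hfnd0] using this
    have hfoldmax :
        words9.foldl (fMax text) ((-1 : Int), "none") = ((i1 : Int), w1) := by
      have := selmax_reach (fun w => PySem.Str.find text w) (fun w => PySem.Str.rfind text w)
        words9 w1 hw1w.1 hfnd1ne hmaxH
        ((-1 : Int), "none") (by show (-1 : Int) < PySem.Str.rfind text w1; rw [hrfd1]; omega)
      simpa only [hrfd1] using this
    -- evaluate B's head and last
    have hqfun : (fun i => (gOf s i).isSome) = qAt s := funext (isSome_gOf s)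
    have hB1 : (msList s).headD ("none", ((s.length : Nat) : Int)) = (w0, (i0 : Int)) := by
      rw [List.headD_eq_head?_getD, msList_eq_filterMap, head?_filterMap, hqfun,
        find?_range_eq_some hi0lt hq0 hmin0]
      simp [gOf, hw0h.1]
    have hB2 : (msList s).getLastD ("none", (-1 : Int)) = (w1, (i1 : Int)) := by
      rw [List.getLastD_eq_getLast?, msList_eq_filterMap, getLast?_filterMap, hqfun,
        find?_range_rev_eq_some hi1lt hq1 hmax1]
      simp [gOf, hw1h.1]
    rw [hfoldmin, hfoldmax, hB1, hB2]
  · -- no word occurs in the text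
    set s := text.toList with hs
    have hq : ∀ i, qAt s i = false := by
      intro i
      by_cases h : qAt s i = true
      · exact absurd ⟨i, h⟩ hEx
      · simpa using h
    have hfind : ∀ w ∈ words9, PySem.Str.find text w = -1 := by
      intro w hw
      rw [PySem.Str.find_eq, ← hs, PySem.Chars.find_eq_neg_one_iff]
      intro hinf
      obtain ⟨j, hpre⟩ := (PySem.Chars.exists_prefix_drop_iff_isIn w.toList s).mpr
        ((PySem.Chars.isIn_iff_infix w.toList s).mpr hinf)
      have : qAt s j = true := by
        rw [qAt, List.any_eq_true]
        exact ⟨w, hw, List.isPrefixOf_iff_prefix.mpr hpre⟩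
      rw [hq j] at this
      exact Bool.false_ne_true this
    have hmsnil : msList s = [] := by
      rw [msList_eq_filterMap]
      apply List.filterMap_eq_nil_iff.mpr
      intro i _
      have := isSome_gOf s i
      rw [hq i] at this
      exact Option.not_isSome_iff_eq_none.mp (by simp [this])
    have h1 : words9.foldl (fMin text) (((s.length : Nat) : Int), "none")
        = (((s.length : Nat) : Int), "none") :=
      selmin_stay (fun w => PySem.Str.find text w) (fun w => PySem.Str.find text w) words9 _
        (fun w hw hne => absurd (hfind w hw) hne)
    have h2 : words9.foldl (fMax text) ((-1 : Int), "none") = ((-1 : Int), "none") :=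
      selmax_stay (fun w => PySem.Str.find text w) (fun w => PySem.Str.rfind text w) words9 _
        (fun w hw hne => absurd (hfind w hw) hne)
    rw [h1, h2, hmsnil]
    simp
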